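-- pv_equiv track=rewrite | github.com/MrWrynn/TutorialPython | Tarea2_CristopherMoreira-JoseCruz.py | cambie_todos_aux
-- ===== SOURCE A (Python) =====
-- def cambie_todos_aux(num,exponente,rep,resultado):
--     dig = num%10
--     if num !=0:
--         if dig in rep:
--             valorA=dig*0
--             return cambie_todos_aux(num//10,exponente+1,rep,resultado+valorA)
--         else:
--             valorB=dig*(10**exponente)
--             return cambie_todos_aux(num//10,exponente+1,rep,resultado+valorB)
--     else:
--         return resultado
-- ===== SOURCE B (Python) =====
-- def cambie_todos_aux(num, exponente, rep, resultado):
--     # Phase 1: materialize the digit list, least significant first.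
--     digs = []
--     while num != 0:
--         digs.append(num % 10)
--         num //= 10
--     # Phase 2: fold over the digit list, skipping digits in rep.
--     total = resultado
--     e = exponente
--     for d in digs:
--         if d not in rep:
--             total += 10 ** e * d
--         e += 1
--     return total
-- ===== Notes on version B (the rewrite author's own statement) =====
-- stated objective: alternative
-- what changed: Replaces the tail recursion (which recomputes 10**exponente via the call chain) by two phases: an iterative loop that materializes the digit list, then a fold over that list accumulating the kept digits.
-- outside the precondition, e.g. on cambie_todos_aux(5, -2, [5], 7): A returns 7, B returns 7; on cambie_todos_aux(3, -1, [], 0): A returns 0.30000000000000004, B returns 0.30000000000000004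
import Mathlib
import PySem

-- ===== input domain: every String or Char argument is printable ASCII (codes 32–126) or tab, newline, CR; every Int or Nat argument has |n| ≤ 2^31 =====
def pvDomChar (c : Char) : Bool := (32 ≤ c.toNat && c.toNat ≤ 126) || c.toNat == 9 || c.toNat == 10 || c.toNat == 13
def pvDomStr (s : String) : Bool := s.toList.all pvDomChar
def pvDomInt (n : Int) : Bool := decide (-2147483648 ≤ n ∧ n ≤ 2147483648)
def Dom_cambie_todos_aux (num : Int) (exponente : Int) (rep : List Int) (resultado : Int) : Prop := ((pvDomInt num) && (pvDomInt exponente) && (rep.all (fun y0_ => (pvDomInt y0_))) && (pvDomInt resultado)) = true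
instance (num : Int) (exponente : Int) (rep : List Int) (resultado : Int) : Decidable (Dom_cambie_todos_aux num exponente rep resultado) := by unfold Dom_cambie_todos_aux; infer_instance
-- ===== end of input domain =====

-- B replaces A's tail recursion by two phases (materialize the digit list, then fold over it);
-- same cost, alternative decomposition. Equivalence is proved on Pre_ (num ≥ 0, exponente ≥ 0).

-- ===== PORT A =====
-- Literal port of A's tail recursion; the '0 < num' guard only makes the recursion total
-- (for num < 0 the Python recursion never returns, and such inputs are outside Pre_).
def cambie_todos_aux (num : Int) (exponente : Int) (rep : List Int) (resultado : Int) : Int :=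
  let dig := PySem.Int.mod num 10
  if h : 0 < num then
    if dig ∈ rep then
      let valorA := dig * 0
      cambie_todos_aux (PySem.Int.floordiv num 10) (exponente + 1) rep (resultado + valorA)
    else
      let valorB := dig * 10 ^ exponente.toNat
      cambie_todos_aux (PySem.Int.floordiv num 10) (exponente + 1) rep (resultado + valorB)
  else
    resultado
termination_by num.toNat
decreasing_by
  all_goals
    rw [PySem.Int.floordiv_eq_ediv_of_pos (by omega)]
    omega

-- ===== PORT B =====
-- Phase 1 of Source B: the while-loop collecting digits least-significant-first.
def pvDigits (num : Int) : List Int :=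
  if h : 0 < num then
    PySem.Int.mod num 10 :: pvDigits (PySem.Int.floordiv num 10)
  else
    []
termination_by num.toNat
decreasing_by
  rw [PySem.Int.floordiv_eq_ediv_of_pos (by omega)]
  omega

-- Phase 2 of Source B: the for-loop over the digit list with state (total, e).
def cambie_todos_aux_alt (num : Int) (exponente : Int) (rep : List Int) (resultado : Int) : Int :=
  let digs := pvDigits num
  (digs.foldl
    (fun (st : Int × Int) d =>
      (if d ∈ rep then st.1 else st.1 + 10 ^ st.2.toNat * d, st.2 + 1))
    (resultado, exponente)).1

-- ===== PRECONDITION & SPEC =====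
-- Pre_ excludes negative num, on which A hits the recursion limit (RecursionError) while B loops
-- forever, and negative exponente, on which 10**exponente is a Python float so the result can leave
-- int (when every digit is in rep, A still returns the untouched int resultado there).
def Pre_cambie_todos_aux (num : Int) (exponente : Int) (rep : List Int) (resultado : Int) : Prop :=
  0 ≤ num ∧ 0 ≤ exponente
instance (num : Int) (exponente : Int) (rep : List Int) (resultado : Int) : Decidable (Pre_cambie_todos_aux num exponente rep resultado) := by unfold Pre_cambie_todos_aux; infer_instance
def pvWitness_cambie_todos_aux : Int × Int × List Int × Int := (523, 0, [2], 0)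

def Spec_cambie_todos_aux (num : Int) (exponente : Int) (rep : List Int) (resultado : Int) (out : Int) : Prop := out = cambie_todos_aux_alt num exponente rep resultado
instance (num : Int) (exponente : Int) (rep : List Int) (resultado : Int) (out : Int) : Decidable (Spec_cambie_todos_aux num exponente rep resultado out) := by unfold Spec_cambie_todos_aux; infer_instance

-- ===== CLAIM (what is proved, stated in full; the proofs are below) =====
def Claim_equal_cambie_todos_aux : Prop := ∀ (num : Int) (exponente : Int) (rep : List Int) (resultado : Int), Dom_cambie_todos_aux num exponente rep resultado → Pre_cambie_todos_aux num exponente rep resultado → Spec_cambie_todos_aux num exponente rep resultado (cambie_todos_aux num exponente rep resultado)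

-- ===== LEMMAS AND PROOFS =====

-- A's recursion equals B's fold over the digit list, for every starting accumulator pair.
theorem cambie_aux_eq_fold (num : Int) (exponente : Int) (rep : List Int) (resultado : Int) :
    cambie_todos_aux num exponente rep resultado =
    ((pvDigits num).foldl
      (fun (st : Int × Int) d =>
        (if d ∈ rep then st.1 else st.1 + 10 ^ st.2.toNat * d, st.2 + 1))
      (resultado, exponente)).1 := by
  by_cases h : 0 < num
  · rw [cambie_todos_aux, pvDigits]
    simp only [h, dif_pos, List.foldl_cons]
    by_cases hd : PySem.Int.mod num 10 ∈ rep
    · simp only [hd, if_pos]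
      rw [cambie_aux_eq_fold]
      ring_nf
    · simp only [hd, if_neg, not_false_iff]
      rw [cambie_aux_eq_fold]
      ring_nf
  · rw [cambie_todos_aux, pvDigits]
    simp [h]
termination_by num.toNat
decreasing_by
  all_goals
    rw [PySem.Int.floordiv_eq_ediv_of_pos (by omega)]
    omega

-- ===== VERDICT (by name: the statement is the Claim_ definition above) =====
theorem cambie_todos_aux_spec : Claim_equal_cambie_todos_aux := by
  intro num exponente rep resultado _ _
  unfold Spec_cambie_todos_aux cambie_todos_aux_alt
  exact cambie_aux_eq_fold num exponente rep resultado
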